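-- pv_equiv track=rewrite | github.com/RexRenatus/korean-flashcard-pipeline | src/python/flashcard_pipeline/rate_limiter_v2.py | _calculate_optimal_shards
-- ===== SOURCE A (Python) =====
-- def _calculate_optimal_shards(rate: int, requested_shards: int) -> int:
--     """Calculate optimal number of shards based on rate"""
--     # Rule: max_qps / 2 from the research, with minimum capacity per shard
--     if rate < 20:
--         return 1  # Low rate, no sharding needed
--
--     # Aim for at least 10 capacity per shard
--     max_shards = max(1, rate // 10)
--
--     # Use power of 2 for efficient hashing
--     optimal = 1
--     while optimal * 2 <= min(requested_shards, max_shards):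
--         optimal *= 2
--
--     return optimal
-- ===== SOURCE B (Python) =====
-- def _calculate_optimal_shards(rate: int, requested_shards: int) -> int:
--     """Calculate optimal number of shards based on rate"""
--     if rate < 20:
--         return 1  # Low rate, no sharding needed
--     max_shards = max(1, rate // 10)
--     m = min(requested_shards, max_shards)
--     if m < 1:
--         return 1
--     # largest power of two <= m, in O(1) via bit_length
--     return 1 << (m.bit_length() - 1)
-- ===== Notes on version B (the rewrite author's own statement) =====
-- stated objective: simpler
-- what changed: Replaces A's doubling while-loop with the closed form 1 << (m.bit_length()-1) (largest power of two <= m), guarding m < 1 to return 1.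
import Mathlib
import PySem

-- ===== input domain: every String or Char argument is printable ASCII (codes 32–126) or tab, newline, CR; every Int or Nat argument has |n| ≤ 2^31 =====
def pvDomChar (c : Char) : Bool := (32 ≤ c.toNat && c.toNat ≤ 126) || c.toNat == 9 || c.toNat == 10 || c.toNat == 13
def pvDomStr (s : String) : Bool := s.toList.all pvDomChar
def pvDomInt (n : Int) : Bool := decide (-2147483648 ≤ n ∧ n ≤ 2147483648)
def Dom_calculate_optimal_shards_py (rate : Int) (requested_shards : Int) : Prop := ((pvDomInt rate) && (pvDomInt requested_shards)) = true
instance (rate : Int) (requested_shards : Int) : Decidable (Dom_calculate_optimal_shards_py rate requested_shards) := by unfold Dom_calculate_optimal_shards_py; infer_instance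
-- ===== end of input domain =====

-- B replaces A's doubling while-loop by the closed form 1 << (m.bit_length()-1) (objective: simpler).

-- ===== PORT A =====
-- the while-loop `while optimal * 2 <= bound: optimal *= 2`; optimal starts at 1 and stays positive,
-- so `bound - optimal` strictly decreases while the guard holds
def pyLoopA (bound : Int) (optimal : Int) (hpos : 0 < optimal) : Int :=
  if h : optimal * 2 ≤ bound then
    pyLoopA bound (optimal * 2) (by omega)
  else
    optimal
termination_by (bound - optimal).toNat
decreasing_by omega

def calculate_optimal_shards_py (rate : Int) (requested_shards : Int) : Int :=
  if rate < 20 then 1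
  else
    let max_shards := max 1 (PySem.Int.floordiv rate 10)
    pyLoopA (min requested_shards max_shards) 1 (by omega)

-- ===== PORT B =====
def calculate_optimal_shards_py_alt (rate : Int) (requested_shards : Int) : Int :=
  if rate < 20 then 1
  else
    let max_shards := max 1 (PySem.Int.floordiv rate 10)
    let m := min requested_shards max_shards
    if m < 1 then 1
    -- for m ≥ 1, Python's m.bit_length() - 1 = Nat.log2 m, and 1 << k = 2^k (exact on this branch)
    else (2 : Int) ^ (Nat.log2 m.toNat)

-- ===== PRECONDITION & SPEC =====
def Spec_calculate_optimal_shards_py (rate : Int) (requested_shards : Int) (out : Int) : Prop := out = calculate_optimal_shards_py_alt rate requested_shards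
instance (rate : Int) (requested_shards : Int) (out : Int) : Decidable (Spec_calculate_optimal_shards_py rate requested_shards out) := by unfold Spec_calculate_optimal_shards_py; infer_instance

-- ===== CLAIM (what is proved, stated in full; the proofs are below) =====
def Claim_equal_calculate_optimal_shards_py : Prop := ∀ (rate : Int) (requested_shards : Int), Dom_calculate_optimal_shards_py rate requested_shards → Spec_calculate_optimal_shards_py rate requested_shards (calculate_optimal_shards_py rate requested_shards)

-- ===== LEMMAS AND PROOFS =====

-- A's loop computes the largest power of two ≤ bound, i.e. 2^(log2 bound) when invoked at a
-- power of two 2^k ≤ bound.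
theorem pyLoopA_eq_pow_log2 (bound : Int) (hb : 1 ≤ bound) (k : ℕ)
    (hk : (2 : Int) ^ k ≤ bound) :
    pyLoopA bound ((2 : Int) ^ k) (by positivity) = (2 : Int) ^ (Nat.log2 bound.toNat) := by
  rw [pyLoopA]
  split_ifs with h
  · have hk1 : (2 : Int) ^ (k + 1) ≤ bound := by rw [pow_succ]; exact h
    convert pyLoopA_eq_pow_log2 bound hb (k + 1) hk1 using 2
  · -- 2^k ≤ bound < 2^(k+1) forces k = log2 bound.toNat
    have hlt : bound < (2 : Int) ^ (k + 1) := by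
      push Not at h; calc bound < 2 ^ k * 2 := h
        _ = 2 ^ (k + 1) := by ring
    have hbn : (bound.toNat : Int) = bound := Int.toNat_of_nonneg (by omega)
    have h1 : 2 ^ k ≤ bound.toNat := by
      have : (2 : Int) ^ k ≤ (bound.toNat : Int) := by rw [hbn]; exact hk
      exact_mod_cast this
    have h2 : bound.toNat < 2 ^ (k + 1) := by
      have : (bound.toNat : Int) < (2 : Int) ^ (k + 1) := by rw [hbn]; exact hlt
      exact_mod_cast this
    have : Nat.log2 bound.toNat = k := by
      rw [Nat.log2_eq_log_two]
      exact Nat.log_eq_of_pow_le_of_lt_pow h1 h2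
    rw [this]
termination_by (bound - 2 ^ k).toNat
decreasing_by
  have : (0:Int) < 2 ^ k := by positivity
  have : (2:Int) ^ (k+1) = 2 ^ k * 2 := by ring
  omega

-- ===== VERDICT (by name: the statement is the Claim_ definition above) =====
theorem calculate_optimal_shards_py_spec : Claim_equal_calculate_optimal_shards_py := by
  intro rate requested_shards _
  unfold Spec_calculate_optimal_shards_py calculate_optimal_shards_py calculate_optimal_shards_py_alt
  split_ifs with h1
  · rfl
  · simp only
    set m := min requested_shards (max 1 (PySem.Int.floordiv rate 10)) with hm
    split_ifs with h2
    · -- m < 1: loop guard 1*2 ≤ m is false immediately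
      rw [pyLoopA]
      simp only [one_mul]
      rw [dif_neg (by omega)]
    · push Not at h2
      have := pyLoopA_eq_pow_log2 m h2 0 (by simpa using h2)
      simpa using this
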